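-- pv_equiv track=rewrite | github.com/cbdb-project/CBDB-disambiguation-automation | CBDB-disambiguation-automation.py | combineAllData
-- ===== SOURCE A (Python) =====
-- def combineAllData(personIDList, variousDataDict):
--     output = {}
--     for cbdb_id in personIDList:
--         if cbdb_id == 0:
--             continue
--         output[cbdb_id] = {}
--         for data_type, data_content in variousDataDict.items():
--             if cbdb_id in data_content:
--                 output[cbdb_id][data_type] = data_content[cbdb_id]
--             else:
--                 output[cbdb_id][data_type] = ""
--     return output
-- ===== SOURCE B (Python) =====
-- def combineAllData(personIDList, variousDataDict):
--     # skeleton: every nonzero id gets a row of empty strings, one per data type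
--     output = {cbdb_id: {data_type: "" for data_type in variousDataDict}
--               for cbdb_id in personIDList if cbdb_id != 0}
--     # single pass over the populated data itself
--     for data_type, data_content in variousDataDict.items():
--         for cbdb_id, value in data_content.items():
--             if cbdb_id in output:
--                 output[cbdb_id][data_type] = value
--     return output
-- ===== Notes on version B (the rewrite author's own statement) =====
-- stated objective: alternative
-- what changed: Instead of probing every data type for every person id (membership test plus lookup per (id,type) pair), B first builds a skeleton of all-empty rows for each nonzero id and then fills values in with a single pass over the populated data entries themselves.
import Mathlib
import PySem

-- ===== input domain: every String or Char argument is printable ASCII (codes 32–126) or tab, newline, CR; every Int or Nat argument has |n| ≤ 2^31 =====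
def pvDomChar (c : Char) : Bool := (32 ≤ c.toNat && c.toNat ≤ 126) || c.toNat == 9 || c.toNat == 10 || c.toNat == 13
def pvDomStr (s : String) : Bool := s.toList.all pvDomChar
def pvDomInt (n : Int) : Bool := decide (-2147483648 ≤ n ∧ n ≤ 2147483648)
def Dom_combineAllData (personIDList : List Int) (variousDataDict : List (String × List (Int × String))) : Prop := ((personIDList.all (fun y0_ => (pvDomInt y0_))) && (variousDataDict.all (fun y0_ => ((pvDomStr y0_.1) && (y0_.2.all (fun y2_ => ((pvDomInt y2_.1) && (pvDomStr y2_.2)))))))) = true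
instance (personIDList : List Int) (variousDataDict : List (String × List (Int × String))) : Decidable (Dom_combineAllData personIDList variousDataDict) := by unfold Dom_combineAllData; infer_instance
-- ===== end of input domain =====

-- B replaces A's per-(id,type) membership probing by a two-pass decomposition: first a skeleton of
-- empty-string rows for every nonzero id, then one pass over the populated data filling values in
-- (objective: alternative decomposition, same result).

-- ===== PORT A =====
-- for each nonzero id, build its row by probing every data type, then assign it
def combineAllData (personIDList : List Int) (variousDataDict : List (String × List (Int × String))) : List (Int × List (String × String)) :=
  (personIDList.foldl
    (fun (output : PySem.Dict Int (PySem.Dict String String)) cbdb_id =>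
      if cbdb_id == 0 then output
      else
        output.insert cbdb_id
          (variousDataDict.foldl
            (fun (row : PySem.Dict String String) p =>
              if (PySem.Dict.mk p.2).contains cbdb_id then
                row.insert p.1 ((PySem.Dict.mk p.2).getD cbdb_id "")
              else
                row.insert p.1 "")
            PySem.Dict.empty))
    PySem.Dict.empty).items.map (fun q => (q.1, q.2.items))

-- ===== PORT B =====
-- pass 1: skeleton with all-empty rows; pass 2: walk the data itself and fill values in
def combineAllData_alt (personIDList : List Int) (variousDataDict : List (String × List (Int × String))) : List (Int × List (String × String)) :=
  let skeleton : PySem.Dict Int (PySem.Dict String String) :=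
    personIDList.foldl
      (fun out cbdb_id =>
        if cbdb_id != 0 then
          out.insert cbdb_id
            (variousDataDict.foldl (fun (row : PySem.Dict String String) p => row.insert p.1 "") PySem.Dict.empty)
        else out)
      PySem.Dict.empty
  let output : PySem.Dict Int (PySem.Dict String String) :=
    variousDataDict.foldl
      (fun out p =>
        p.2.foldl
          (fun (out : PySem.Dict Int (PySem.Dict String String)) q =>
            if out.contains q.1 then
              out.modify q.1 PySem.Dict.empty (fun row => row.insert p.1 q.2)
            else out)
          out)
      skeleton
  output.items.map (fun q => (q.1, q.2.items))

-- ===== PRECONDITION & SPEC =====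
-- Pre_ requires unique keys at both dict levels: the association lists stand for Python dicts
-- (variousDataDict and each data_content), whose keys are necessarily distinct, so no input A
-- accepts is excluded.
def Pre_combineAllData (personIDList : List Int) (variousDataDict : List (String × List (Int × String))) : Prop :=
  (variousDataDict.map Prod.fst).Nodup ∧ ∀ p ∈ variousDataDict, (p.2.map Prod.fst).Nodup
instance (personIDList : List Int) (variousDataDict : List (String × List (Int × String))) : Decidable (Pre_combineAllData personIDList variousDataDict) := by unfold Pre_combineAllData; infer_instance

def pvWitness_combineAllData : List Int × (List (String × List (Int × String))) :=
  ([1, 0, 2], [("x", [(1, "a")]), ("y", [(2, "b"), (3, "c")])])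

def Spec_combineAllData (personIDList : List Int) (variousDataDict : List (String × List (Int × String))) (out : List (Int × List (String × String))) : Prop := out = combineAllData_alt personIDList variousDataDict
instance (personIDList : List Int) (variousDataDict : List (String × List (Int × String))) (out : List (Int × List (String × String))) : Decidable (Spec_combineAllData personIDList variousDataDict out) := by unfold Spec_combineAllData; infer_instance

-- ===== CLAIM (what is proved, stated in full; the proofs are below) =====
def Claim_equal_combineAllData : Prop := ∀ (personIDList : List Int) (variousDataDict : List (String × List (Int × String))), Dom_combineAllData personIDList variousDataDict → Pre_combineAllData personIDList variousDataDict → Spec_combineAllData personIDList variousDataDict (combineAllData personIDList variousDataDict)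

-- ===== LEMMAS AND PROOFS =====

-- A's loop with a `continue` on 0 is the loop over the nonzero-filtered list
theorem pvFoldlSkipA {β : Type} (g : β → Int → β) (l : List Int) (d : β) :
    l.foldl (fun d x => if x == 0 then d else g d x) d = (l.filter (fun x => x != 0)).foldl g d := by
  induction l generalizing d with
  | nil => rfl
  | cons x l ih =>
      rw [List.foldl_cons, List.filter_cons]
      cases hx : x == 0
      · rw [if_neg (by simp [hx]), if_pos (by simp [bne, hx]), List.foldl_cons, ih]
      · rw [if_pos (by simp [hx]), if_neg (by simp [bne, hx]), ih]

theorem pvFoldlSkipB {β : Type} (g : β → Int → β) (l : List Int) (d : β) :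
    l.foldl (fun d x => if x != 0 then g d x else d) d = (l.filter (fun x => x != 0)).foldl g d := by
  induction l generalizing d with
  | nil => rfl
  | cons x l ih =>
      rw [List.foldl_cons, List.filter_cons]
      cases hx : x == 0
      · rw [if_pos (by simp [bne, hx]), if_pos (by simp [bne, hx]), List.foldl_cons, ih]
      · rw [if_neg (by simp [bne, hx]), if_neg (by simp [bne, hx]), ih]


-- reduce an if whose Bool guard has been substituted by `cases`
theorem pvIfF {α : Sort _} (a b : α) : (if false = true then a else b) = b := rfl
theorem pvIfT {α : Sort _} (a b : α) : (if true = true then a else b) = a := rfl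

-- lookup after a fold that inserts a value depending only on the key
theorem pvGetDFoldlInsert {κ ν : Type} [BEq κ] [LawfulBEq κ] [DecidableEq κ]
    (l : List κ) (f : κ → ν) (d : PySem.Dict κ ν) (k : κ) (dflt : ν) :
    (l.foldl (fun d x => d.insert x (f x)) d).getD k dflt
      = if k ∈ l then f k else d.getD k dflt := by
  induction l generalizing d with
  | nil => simp
  | cons x l ih =>
      rw [List.foldl_cons, ih]
      by_cases hx : k = x
      · subst hx; simp
      · simp [PySem.Dict.getD_insert, hx, List.mem_cons]

-- the fill pass touches only values: contains is preserved (content level)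
theorem pvContainsContentFold (content : List (Int × String)) (dt : String)
    (out : PySem.Dict Int (PySem.Dict String String)) (j : Int) :
    (content.foldl
        (fun out q => if out.contains q.1 then
            out.modify q.1 PySem.Dict.empty (fun row => row.insert dt q.2) else out)
        out).contains j = out.contains j := by
  induction content generalizing out with
  | nil => rfl
  | cons q content ih =>
      by_cases h : out.contains q.1
      · rw [List.foldl_cons, if_pos h, ih, PySem.Dict.contains_modify]
        cases hj : j == q.1
        · simp
        · simp [show j = q.1 from by exact eq_of_beq hj, h]
      · rw [List.foldl_cons, if_neg h, ih]

-- and keys are preserved (content level)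
theorem pvKeysContentFold (content : List (Int × String)) (dt : String)
    (out : PySem.Dict Int (PySem.Dict String String)) :
    (content.foldl
        (fun out q => if out.contains q.1 then
            out.modify q.1 PySem.Dict.empty (fun row => row.insert dt q.2) else out)
        out).keys = out.keys := by
  induction content generalizing out with
  | nil => rfl
  | cons q content ih =>
      by_cases h : out.contains q.1
      · rw [List.foldl_cons, if_pos h, ih, PySem.Dict.keys_modify,
          PySem.Dict.keys_insert_of_contains _ _ h]
      · rw [List.foldl_cons, if_neg h, ih]

-- keys are preserved by the whole fill pass
theorem pvKeysFill (vd : List (String × List (Int × String)))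
    (out : PySem.Dict Int (PySem.Dict String String)) :
    (vd.foldl
        (fun out p => p.2.foldl
          (fun (out : PySem.Dict Int (PySem.Dict String String)) q =>
            if out.contains q.1 then
              out.modify q.1 PySem.Dict.empty (fun row => row.insert p.1 q.2)
            else out) out)
        out).keys = out.keys := by
  induction vd generalizing out with
  | nil => rfl
  | cons p vd ih => rw [List.foldl_cons, ih, pvKeysContentFold]

-- the value at a single key k through the content-level fill
theorem pvGetDContentFold (content : List (Int × String)) (dt : String)
    (out : PySem.Dict Int (PySem.Dict String String)) (k : Int)
    (hk : out.contains k = true) :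
    (content.foldl
        (fun out q => if out.contains q.1 then
            out.modify q.1 PySem.Dict.empty (fun row => row.insert dt q.2) else out)
        out).getD k PySem.Dict.empty
      = content.foldl (fun row q => if q.1 == k then row.insert dt q.2 else row)
          (out.getD k PySem.Dict.empty) := by
  induction content generalizing out with
  | nil => rfl
  | cons q content ih =>
      rw [List.foldl_cons, List.foldl_cons]
      cases hq : q.1 == k
      · rw [pvIfF]
        by_cases h : out.contains q.1
        · rw [if_pos h, ih _ (by rw [PySem.Dict.contains_modify]; simp [hk]),
            PySem.Dict.getD_modify, if_neg (show ¬(k = q.1) by intro he; rw [he] at hq; simp at hq)]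
        · rw [if_neg h, ih _ hk]
      · rw [pvIfT]
        have hqe : q.1 = k := eq_of_beq hq
        rw [hqe, if_pos hk, ih _ (by rw [PySem.Dict.contains_modify]; simp [hk]),
          PySem.Dict.getD_modify_self]

-- the value at a single key k through the whole fill pass
theorem pvGetDFill (vd : List (String × List (Int × String)))
    (out : PySem.Dict Int (PySem.Dict String String)) (k : Int)
    (hk : out.contains k = true) :
    (vd.foldl
        (fun out p => p.2.foldl
          (fun (out : PySem.Dict Int (PySem.Dict String String)) q =>
            if out.contains q.1 then
              out.modify q.1 PySem.Dict.empty (fun row => row.insert p.1 q.2)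
            else out) out)
        out).getD k PySem.Dict.empty
      = vd.foldl
          (fun row p => p.2.foldl
            (fun row q => if q.1 == k then row.insert p.1 q.2 else row) row)
          (out.getD k PySem.Dict.empty) := by
  induction vd generalizing out with
  | nil => rfl
  | cons p vd ih =>
      rw [List.foldl_cons, List.foldl_cons, ih _ (by rw [pvContainsContentFold]; exact hk),
        pvGetDContentFold _ _ _ _ hk]

-- A's two insert branches are one insert of a conditional value
theorem pvStepAEq (k : Int) :
    (fun (row : PySem.Dict String String) (p : String × List (Int × String)) =>
        if (PySem.Dict.mk p.2).contains k then
          row.insert p.1 ((PySem.Dict.mk p.2).getD k "")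
        else row.insert p.1 "")
      = fun row p => row.insert p.1
          (if (PySem.Dict.mk p.2).contains k then (PySem.Dict.mk p.2).getD k "" else "") := by
  funext row p
  by_cases h : (PySem.Dict.mk p.2).contains k <;> simp [h]

-- the all-empty row lookup is always ""
theorem pvGetDBlank (vd : List (String × List (Int × String)))
    (row : PySem.Dict String String) (dt : String) (h : row.getD dt "" = "") :
    (vd.foldl (fun (row : PySem.Dict String String) p => row.insert p.1 "") row).getD dt "" = "" := by
  induction vd generalizing row with
  | nil => exact h
  | cons p vd ih =>
      rw [List.foldl_cons]
      exact ih _ (by rw [PySem.Dict.getD_insert]; split <;> simp [h])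

-- the inner content fold at its own slot dt: last (= unique) match wins
theorem pvContentSlot (content : List (Int × String)) (row : PySem.Dict String String)
    (k : Int) (dt : String) (hnd : (content.map Prod.fst).Nodup) :
    (content.foldl (fun row q => if q.1 == k then row.insert dt q.2 else row) row).getD dt ""
      = if (PySem.Dict.mk content).contains k then (PySem.Dict.mk content).getD k "" else row.getD dt "" := by
  induction content generalizing row with
  | nil => simp [PySem.Dict.contains_mk]
  | cons q content ih =>
      simp only [List.map_cons, List.nodup_cons] at hnd
      rw [List.foldl_cons]
      cases hq : q.1 == k
      · rw [pvIfF, ih _ hnd.2, PySem.Dict.contains_mk, PySem.Dict.contains_mk,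
          List.any_cons, hq, Bool.false_or]
        by_cases hany : (content.any fun p => p.1 == k) = true
        · rw [if_pos hany, if_pos hany, PySem.Dict.getD_eq_get?_getD,
            PySem.Dict.getD_eq_get?_getD, PySem.Dict.get?_mk_cons,
            if_neg (show ¬((q.1 == k) = true) by simp [hq])]
        · rw [if_neg hany, if_neg hany]
      · have hqe : q.1 = k := eq_of_beq hq
        have hrest : (PySem.Dict.mk content).contains k = false := by
          rw [PySem.Dict.contains_mk]
          simp only [List.any_eq_false]
          intro p hp hpk
          exact hnd.1 (by rw [hqe, ← eq_of_beq hpk]; exact List.mem_map_of_mem hp)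
        rw [pvIfT, ih _ hnd.2, hrest, if_neg (show ¬(false = true) by simp),
          PySem.Dict.getD_insert_self, PySem.Dict.contains_mk, List.any_cons, hq,
          Bool.true_or, if_pos rfl, PySem.Dict.getD_eq_get?_getD, PySem.Dict.get?_mk_cons,
          if_pos hq]
        rfl

-- the inner content fold leaves every other slot alone
theorem pvContentOther (content : List (Int × String)) (row : PySem.Dict String String)
    (k : Int) (dtIns dt : String) (h : dt ≠ dtIns) :
    (content.foldl (fun row q => if q.1 == k then row.insert dtIns q.2 else row) row).getD dt ""
      = row.getD dt "" := by
  induction content generalizing row with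
  | nil => rfl
  | cons q content ih =>
      rw [List.foldl_cons]
      cases hq : q.1 == k
      · rw [pvIfF, ih]
      · rw [pvIfT, ih, PySem.Dict.getD_insert, if_neg h]

-- main row agreement: A's probing row-build and B's filling agree slot by slot
theorem pvRowsAgree (vd : List (String × List (Int × String))) (k : Int) (dt : String)
    (rA rB : PySem.Dict String String)
    (hnd : (vd.map Prod.fst).Nodup) (hnd2 : ∀ p ∈ vd, (p.2.map Prod.fst).Nodup)
    (hAB : rA.getD dt "" = rB.getD dt "") (hblank : dt ∈ vd.map Prod.fst → rA.getD dt "" = "") :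
    (vd.foldl (fun row p => row.insert p.1
        (if (PySem.Dict.mk p.2).contains k then (PySem.Dict.mk p.2).getD k "" else "")) rA).getD dt ""
      = (vd.foldl (fun row p => p.2.foldl
          (fun row q => if q.1 == k then row.insert p.1 q.2 else row) row) rB).getD dt "" := by
  induction vd generalizing rA rB with
  | nil => exact hAB
  | cons p vd ih =>
      simp only [List.map_cons, List.nodup_cons] at hnd
      rw [List.foldl_cons, List.foldl_cons]
      by_cases hdt : dt = p.1
      · refine ih _ _ hnd.2 (fun p hp => hnd2 p (List.mem_cons_of_mem _ hp)) ?_ ?_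
        · rw [hdt, PySem.Dict.getD_insert_self,
            pvContentSlot _ _ _ _ (hnd2 p (List.mem_cons_self)), ← hdt,
            ← hAB, hblank (by rw [hdt]; exact List.mem_map_of_mem List.mem_cons_self)]
        · intro hmem
          rw [hdt] at hmem ⊢
          exact absurd hmem hnd.1
      · refine ih _ _ hnd.2 (fun p hp => hnd2 p (List.mem_cons_of_mem _ hp)) ?_ ?_
        · rw [PySem.Dict.getD_insert, if_neg hdt, pvContentOther _ _ _ _ _ hdt, hAB]
        · intro hmem
          rw [PySem.Dict.getD_insert, if_neg hdt]
          exact hblank (by simp [hmem])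

-- keys through B's inner fill: inserted slots already exist
theorem pvKeysContentFoldInner (content : List (Int × String)) (row : PySem.Dict String String)
    (k : Int) (dt : String) (h : dt ∈ row.keys) :
    (content.foldl (fun row q => if q.1 == k then row.insert dt q.2 else row) row).keys
      = row.keys := by
  induction content generalizing row with
  | nil => rfl
  | cons q content ih =>
      rw [List.foldl_cons]
      cases hq : q.1 == k
      · rw [pvIfF, ih _ h]
      · rw [pvIfT,
          ih _ (by rw [PySem.Dict.keys_insert_of_contains _ _ ((PySem.Dict.contains_iff_mem_keys _ _).2 h)]; exact h),
          PySem.Dict.keys_insert_of_contains _ _ ((PySem.Dict.contains_iff_mem_keys _ _).2 h)]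

theorem pvKeysInnerFill (vd' : List (String × List (Int × String))) (k : Int)
    (row : PySem.Dict String String) (h : ∀ p ∈ vd', p.1 ∈ row.keys) :
    (vd'.foldl (fun row p => p.2.foldl
        (fun row q => if q.1 == k then row.insert p.1 q.2 else row) row) row).keys
      = row.keys := by
  induction vd' generalizing row with
  | nil => rfl
  | cons p vd' ih =>
      rw [List.foldl_cons,
        ih _ (fun p' hp' => by
          rw [pvKeysContentFoldInner _ _ _ _ (h p List.mem_cons_self)]
          exact h p' (List.mem_cons_of_mem _ hp')),
        pvKeysContentFoldInner _ _ _ _ (h p List.mem_cons_self)]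

-- A's row for key k equals B's filled row for key k (as dicts)
theorem pvInnerEq (vd : List (String × List (Int × String))) (k : Int)
    (hnd : (vd.map Prod.fst).Nodup) (hnd2 : ∀ p ∈ vd, (p.2.map Prod.fst).Nodup) :
    (vd.foldl (fun (row : PySem.Dict String String) p =>
        if (PySem.Dict.mk p.2).contains k then
          row.insert p.1 ((PySem.Dict.mk p.2).getD k "")
        else row.insert p.1 "") PySem.Dict.empty)
      = (vd.foldl (fun row p => p.2.foldl
          (fun row q => if q.1 == k then row.insert p.1 q.2 else row) row)
          (vd.foldl (fun (row : PySem.Dict String String) p => row.insert p.1 "") PySem.Dict.empty)) := by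
  have hblankkeys : (vd.foldl (fun (row : PySem.Dict String String) p => row.insert p.1 "") PySem.Dict.empty).keys
      = PySem.Set.ofList (vd.map Prod.fst) := by
    simpa using PySem.Dict.keys_foldl_insert_key vd Prod.fst (fun _ _ => "") PySem.Dict.empty
  have hkA : (vd.foldl (fun (row : PySem.Dict String String) p =>
        if (PySem.Dict.mk p.2).contains k then
          row.insert p.1 ((PySem.Dict.mk p.2).getD k "")
        else row.insert p.1 "") PySem.Dict.empty).keys = PySem.Set.ofList (vd.map Prod.fst) := by
    rw [pvStepAEq]
    simpa using PySem.Dict.keys_foldl_insert_key vd Prod.fst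
      (fun row p => if (PySem.Dict.mk p.2).contains k then (PySem.Dict.mk p.2).getD k "" else "")
      PySem.Dict.empty
  have hkB : (vd.foldl (fun row p => p.2.foldl
          (fun row q => if q.1 == k then row.insert p.1 q.2 else row) row)
          (vd.foldl (fun (row : PySem.Dict String String) p => row.insert p.1 "") PySem.Dict.empty)).keys
      = PySem.Set.ofList (vd.map Prod.fst) := by
    rw [pvKeysInnerFill _ _ _ (fun p hp => by
        rw [hblankkeys]; exact (PySem.Set.mem_ofList _ _).2 (List.mem_map_of_mem hp)),
      hblankkeys]
  have hndA : (vd.foldl (fun (row : PySem.Dict String String) p =>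
        if (PySem.Dict.mk p.2).contains k then
          row.insert p.1 ((PySem.Dict.mk p.2).getD k "")
        else row.insert p.1 "") PySem.Dict.empty).keys.Nodup := by
    rw [hkA]; exact PySem.Set.nodup_ofList _
  have hndB : (vd.foldl (fun row p => p.2.foldl
          (fun row q => if q.1 == k then row.insert p.1 q.2 else row) row)
          (vd.foldl (fun (row : PySem.Dict String String) p => row.insert p.1 "") PySem.Dict.empty)).keys.Nodup := by
    rw [hkB]; exact PySem.Set.nodup_ofList _
  apply PySem.Dict.ext
  rw [PySem.Dict.items_eq_map_keys _ hndA "", PySem.Dict.items_eq_map_keys _ hndB "", hkA, hkB]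
  apply List.map_congr_left
  intro dt _
  have := pvRowsAgree vd k dt PySem.Dict.empty
      (vd.foldl (fun (row : PySem.Dict String String) p => row.insert p.1 "") PySem.Dict.empty)
      hnd hnd2 (by rw [PySem.Dict.getD_empty, pvGetDBlank _ _ _ (PySem.Dict.getD_empty _ _)])
      (fun _ => PySem.Dict.getD_empty _ _)
  rw [pvStepAEq] at *
  rw [this]

-- ===== VERDICT (by name: the statement is the Claim_ definition above) =====
theorem combineAllData_spec : Claim_equal_combineAllData := by
  intro personIDList vd _hdom hpre
  obtain ⟨hnd, hnd2⟩ := hpre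
  unfold Spec_combineAllData combineAllData combineAllData_alt
  rw [pvFoldlSkipA, pvFoldlSkipB]
  set F := personIDList.filter (fun x => x != 0) with hF
  congr 1
  -- the two outer dicts have the same items
  set rowA := fun (k : Int) => vd.foldl (fun (row : PySem.Dict String String) p =>
      if (PySem.Dict.mk p.2).contains k then
        row.insert p.1 ((PySem.Dict.mk p.2).getD k "")
      else row.insert p.1 "") PySem.Dict.empty with hrowA
  set blank := vd.foldl (fun (row : PySem.Dict String String) p => row.insert p.1 "") PySem.Dict.empty with hblank
  have hkA : (F.foldl (fun d k => d.insert k (rowA k)) PySem.Dict.empty).keys = PySem.Set.ofList F := by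
    simpa using PySem.Dict.keys_foldl_insert F (fun _ x => rowA x) PySem.Dict.empty
  have hkS : (F.foldl (fun d k => d.insert k blank) PySem.Dict.empty).keys = PySem.Set.ofList F := by
    simpa using PySem.Dict.keys_foldl_insert F (fun _ _ => blank) PySem.Dict.empty
  have hkB : ((vd.foldl
        (fun out p => p.2.foldl
          (fun (out : PySem.Dict Int (PySem.Dict String String)) q =>
            if out.contains q.1 then
              out.modify q.1 PySem.Dict.empty (fun row => row.insert p.1 q.2)
            else out) out)
        (F.foldl (fun d k => d.insert k blank) PySem.Dict.empty))).keys = PySem.Set.ofList F := by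
    rw [pvKeysFill, hkS]
  have hndA : (F.foldl (fun d k => d.insert k (rowA k)) PySem.Dict.empty).keys.Nodup := by
    rw [hkA]; exact PySem.Set.nodup_ofList _
  have hndB : ((vd.foldl
        (fun out p => p.2.foldl
          (fun (out : PySem.Dict Int (PySem.Dict String String)) q =>
            if out.contains q.1 then
              out.modify q.1 PySem.Dict.empty (fun row => row.insert p.1 q.2)
            else out) out)
        (F.foldl (fun d k => d.insert k blank) PySem.Dict.empty))).keys.Nodup := by
    rw [hkB]; exact PySem.Set.nodup_ofList _
  rw [PySem.Dict.items_eq_map_keys _ hndA PySem.Dict.empty,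
    PySem.Dict.items_eq_map_keys _ hndB PySem.Dict.empty, hkA, hkB]
  apply List.map_congr_left
  intro k hk
  have hkF : k ∈ F := (PySem.Set.mem_ofList _ _).1 hk
  have hgA : (F.foldl (fun d k => d.insert k (rowA k)) PySem.Dict.empty).getD k PySem.Dict.empty = rowA k := by
    rw [pvGetDFoldlInsert, if_pos hkF]
  have hcS : (F.foldl (fun d k => d.insert k blank) PySem.Dict.empty).contains k = true := by
    rw [PySem.Dict.contains_iff_mem_keys, hkS]
    exact (PySem.Set.mem_ofList _ _).2 hkF
  have hgS : (F.foldl (fun d k => d.insert k blank) PySem.Dict.empty).getD k PySem.Dict.empty = blank := by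
    rw [pvGetDFoldlInsert, if_pos hkF]
  rw [hgA, pvGetDFill _ _ _ hcS, hgS]
  simp only [hrowA, hblank]
  rw [pvInnerEq vd k hnd hnd2]
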